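-- pv_equiv track=rewrite | github.com/pflanner/adventofcode | year2017/20.py | get_matching_positions
-- ===== SOURCE A (Python) =====
-- def get_matching_positions(ps):
--     matching = set()
--     for i, p1 in enumerate(ps[:-1]):
--         for j, p2 in enumerate(ps[i + 1:], i + 1):
--             if p1 == p2:
--                 matching.add(i)
--                 matching.add(j)
--     return matching
-- ===== SOURCE B (Python) =====
-- def get_matching_positions(ps):
--     groups = {}
--     for i, p in enumerate(ps):
--         groups.setdefault(p, []).append(i)
--     matching = set()
--     for group in groups.values():
--         if len(group) > 1:
--             matching.update(group)
--     return matching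
-- ===== Notes on version B (the rewrite author's own statement) =====
-- stated objective: faster
-- what changed: Replaces the quadratic all-pairs comparison with a single pass that groups indices by value in a dict and then unions every group of size > 1.
import Mathlib
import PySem

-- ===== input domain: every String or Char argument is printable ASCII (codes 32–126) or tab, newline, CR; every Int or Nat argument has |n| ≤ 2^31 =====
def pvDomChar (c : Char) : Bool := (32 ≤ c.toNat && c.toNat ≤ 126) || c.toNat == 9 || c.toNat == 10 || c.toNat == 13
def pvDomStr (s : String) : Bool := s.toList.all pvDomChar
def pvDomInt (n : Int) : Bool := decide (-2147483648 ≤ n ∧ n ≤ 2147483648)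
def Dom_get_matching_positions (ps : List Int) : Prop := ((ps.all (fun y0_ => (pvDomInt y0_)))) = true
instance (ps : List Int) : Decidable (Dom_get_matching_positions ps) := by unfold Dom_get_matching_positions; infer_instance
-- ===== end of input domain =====

-- B replaces A's quadratic all-pairs scan with one pass that groups indices by value in a
-- dict and unions every group of size > 1 (asymptotically faster); the ports produce the
-- identical element list.

-- ===== PORT A =====
def get_matching_positions (ps : List Int) : List Int :=
  (PySem.List.enumerate (PySem.List.slice ps none (some (-1))) 0).foldl
    (fun matching ip =>
      (PySem.List.enumerate (PySem.List.slice ps (some (ip.1 + 1)) none) (ip.1 + 1)).foldl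
        (fun m jq => if ip.2 = jq.2 then PySem.Set.add (PySem.Set.add m ip.1) jq.1 else m)
        matching)
    PySem.Set.empty

-- ===== PORT B =====
-- groups.setdefault(p, []).append(i) is exactly Dict.modify p [] (· ++ [i])
def get_matching_positions_alt (ps : List Int) : List Int :=
  let groups : PySem.Dict Int (List Int) :=
    (PySem.List.enumerate ps 0).foldl
      (fun d q => d.modify q.2 [] (fun g => g ++ [q.1])) PySem.Dict.empty
  (PySem.Dict.values groups).foldl
    (fun matching g => if 1 < g.length then PySem.Set.update matching g else matching)
    PySem.Set.empty

-- ===== PRECONDITION & SPEC =====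
def Spec_get_matching_positions (ps : List Int) (out : List Int) : Prop := out = get_matching_positions_alt ps
instance (ps : List Int) (out : List Int) : Decidable (Spec_get_matching_positions ps out) := by unfold Spec_get_matching_positions; infer_instance

-- ===== CLAIM (what is proved, stated in full; the proofs are below) =====
def Claim_equal_get_matching_positions : Prop := ∀ (ps : List Int), Dom_get_matching_positions ps → Spec_get_matching_positions ps (get_matching_positions ps)

-- ===== LEMMAS AND PROOFS =====

-- occurrence indices of x in r, offsets starting at k
def pvOcc (k : Nat) (x : Int) : List Int → List Int
  | [] => []
  | y :: r => (if x = y then [(k : Int)] else []) ++ pvOcc (k + 1) x r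

-- A's nested loop as a structural recursion on the list (k = absolute index of the head)
def pvG : List Int → List Int → Nat → List Int
  | [], s, _ => s
  | x :: r, s, k =>
    pvG r
      ((PySem.List.enumerate r ((k : Int) + 1)).foldl
        (fun m jq => if x = jq.2 then PySem.Set.add (PySem.Set.add m (k : Int)) jq.1 else m) s)
      (k + 1)

-- the canonical add-sequence: for each first occurrence (value not in seen) of a
-- duplicated value, its whole group of occurrence indices
def pvCseq (seen : List Int) (k : Nat) : List Int → List Int
  | [] => []
  | x :: r =>
    (if x ∈ seen then [] else if x ∈ r then (k : Int) :: pvOcc (k + 1) x r else [])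
      ++ pvCseq (x :: seen) (k + 1) r

-- the elements Set.update s l appends (first occurrences of l not in s)
def pvD (s : List Int) : List Int → List Int
  | [] => []
  | y :: l => if y ∈ s then pvD s l else y :: pvD (s ++ [y]) l

theorem pv_add_of_mem {s : List Int} {x : Int} (h : x ∈ s) : PySem.Set.add s x = s := by
  simp [PySem.Set.add, PySem.Set.contains, h]

theorem pv_mem_add {s : List Int} {x y : Int} (h : x ∈ s) : x ∈ PySem.Set.add s y := by
  simp [PySem.Set.mem_add]; tauto

theorem pv_mem_add_self (s : List Int) (x : Int) : x ∈ PySem.Set.add s x := by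
  simp [PySem.Set.mem_add]

theorem pv_update_append (s a b : List Int) :
    PySem.Set.update s (a ++ b) = PySem.Set.update (PySem.Set.update s a) b := by
  simp [PySem.Set.update, List.foldl_append]

theorem pv_mem_update_left {s : List Int} {x : Int} (l : List Int) (h : x ∈ s) :
    x ∈ PySem.Set.update s l := by
  induction l generalizing s with
  | nil => exact h
  | cons a l ih => exact ih (pv_mem_add h)

theorem pv_mem_update_right {l : List Int} {x : Int} (s : List Int) (h : x ∈ l) :
    x ∈ PySem.Set.update s l := by
  induction l generalizing s with
  | nil => cases h
  | cons a l ih =>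
    rcases List.mem_cons.1 h with rfl | hx
    · exact pv_mem_update_left l (pv_mem_add_self s x)
    · exact ih _ hx

theorem pv_update_absorb {s l : List Int} (h : ∀ e ∈ l, e ∈ s) : PySem.Set.update s l = s := by
  induction l generalizing s with
  | nil => rfl
  | cons a l ih =>
    have ha : a ∈ s := h a (by simp)
    show PySem.Set.update (PySem.Set.add s a) l = s
    rw [pv_add_of_mem ha]
    exact ih fun e he => h e (by simp [he])

theorem pvOcc_eq_nil {x : Int} {r : List Int} (h : x ∉ r) (k : Nat) : pvOcc k x r = [] := by
  induction r generalizing k with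
  | nil => rfl
  | cons y r ih =>
    simp only [List.mem_cons, not_or] at h
    simp [pvOcc, h.1, ih h.2]

theorem pvOcc_ne_nil {x : Int} {r : List Int} (h : x ∈ r) (k : Nat) : pvOcc k x r ≠ [] := by
  induction r generalizing k with
  | nil => cases h
  | cons y r ih =>
    rcases List.mem_cons.1 h with rfl | hx
    · simp [pvOcc]
    · by_cases hxy : x = y
      · simp [pvOcc, hxy]
      · simpa [pvOcc, hxy] using ih hx (k + 1)

theorem pvOcc_append (x : Int) (l t : List Int) (k : Nat) :
    pvOcc k x (l ++ t) = pvOcc k x l ++ pvOcc (k + l.length) x t := by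
  induction l generalizing k with
  | nil => simp [pvOcc]
  | cons y l ih =>
    simp only [List.cons_append, pvOcc, ih, List.append_assoc, List.length_cons]
    ring_nf

theorem pvOcc_mem_tail {v e : Int} {r : List Int} {k : Nat} (x : Int)
    (h : e ∈ pvOcc (k + 1) v r) : e ∈ pvOcc k v (x :: r) := by
  simp only [pvOcc, List.mem_append]
  exact Or.inr h

-- one pass of A's inner loop: it adds k and the occurrence indices of x in r
theorem pv_row (x : Int) (k : Nat) :
    ∀ (r : List Int) (m : Nat) (s : List Int),
      (PySem.List.enumerate r ((m : Nat) : Int)).foldl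
        (fun mm jq => if x = jq.2 then PySem.Set.add (PySem.Set.add mm (k : Int)) jq.1 else mm) s
      = if x ∈ r then PySem.Set.update (PySem.Set.add s (k : Int)) (pvOcc m x r) else s := by
  intro r
  induction r with
  | nil => intro m s; simp [PySem.List.enumerate_nil]
  | cons y r ih =>
    intro m s
    rw [PySem.List.enumerate_cons]
    have hc : ((m : Int) + 1) = (((m + 1 : Nat)) : Int) := by push_cast; ring
    rw [List.foldl_cons, hc]
    by_cases hxy : x = y
    · rw [if_pos hxy, ih (m + 1)]
      subst hxy
      have hkmem : (k : Int) ∈ PySem.Set.add (PySem.Set.add s (k : Int)) ((m : Nat) : Int) :=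
        pv_mem_add (pv_mem_add_self s (k : Int))
      simp only [pvOcc, List.mem_cons, true_or, if_true]
      by_cases hxr : x ∈ r
      · rw [if_pos hxr, pv_add_of_mem hkmem]
        simp [PySem.Set.update]
      · rw [if_neg hxr, pvOcc_eq_nil hxr]
        simp [PySem.Set.update]
    · rw [if_neg hxy, ih (m + 1)]
      have hmm : (x ∈ y :: r) = (x ∈ r) := by simp [List.mem_cons, hxy]
      simp [pvOcc, hxy, hmm]

-- main A-side lemma: pvG is fold-add of the canonical sequence, provided all occurrence
-- indices of already-seen values are in the accumulator
theorem pvG_eq_update :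
    ∀ (t : List Int) (k : Nat) (s seen : List Int),
      (∀ v ∈ seen, ∀ e ∈ pvOcc k v t, e ∈ s) →
      pvG t s k = PySem.Set.update s (pvCseq seen k t) := by
  intro t
  induction t with
  | nil => intro k s seen _; simp [pvG, pvCseq, PySem.Set.update]
  | cons x r ih =>
    intro k s seen hseen
    have hcast : ((k : Int) + 1) = (((k + 1 : Nat)) : Int) := by push_cast; ring
    have hrow : (PySem.List.enumerate r ((k : Int) + 1)).foldl
        (fun m jq => if x = jq.2 then PySem.Set.add (PySem.Set.add m (k : Int)) jq.1 else m) s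
        = if x ∈ r then PySem.Set.update (PySem.Set.add s (k : Int)) (pvOcc (k + 1) x r) else s := by
      rw [hcast, pv_row x k r (k + 1) s]
    show pvG r _ (k + 1) = _
    rw [hrow]
    by_cases hx : x ∈ seen
    · have hself : ∀ e ∈ pvOcc k x (x :: r), e ∈ s := hseen x hx
      have hocc : ∀ e ∈ pvOcc (k + 1) x r, e ∈ s := by
        intro e he; exact hself e (pvOcc_mem_tail x he)
      have hk : (k : Int) ∈ s := by
        apply hself; simp [pvOcc]
      have hR : (if x ∈ r then PySem.Set.update (PySem.Set.add s (k : Int)) (pvOcc (k + 1) x r) else s) = s := by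
        split_ifs with hxr
        · rw [pv_add_of_mem hk]; exact pv_update_absorb hocc
        · rfl
      rw [hR, ih (k + 1) s (x :: seen) ?_]
      · simp [pvCseq, hx]
      · intro v hv e he
        rcases List.mem_cons.1 hv with rfl | hv'
        · exact hocc e he
        · exact hseen v hv' e (pvOcc_mem_tail x he)
    · set h := (if x ∈ r then (k : Int) :: pvOcc (k + 1) x r else []) with hh
      have hR : (if x ∈ r then PySem.Set.update (PySem.Set.add s (k : Int)) (pvOcc (k + 1) x r) else s)
          = PySem.Set.update s h := by
        rw [hh]
        split_ifs with hxr
        · rfl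
        · rfl
      rw [hR, ih (k + 1) (PySem.Set.update s h) (x :: seen) ?_]
      · have : pvCseq seen k (x :: r) = h ++ pvCseq (x :: seen) (k + 1) r := by
          simp [pvCseq, hx, hh]
        rw [this, pv_update_append]
      · intro v hv e he
        rcases List.mem_cons.1 hv with rfl | hv'
        · by_cases hvr : v ∈ r
          · apply pv_mem_update_right
            rw [hh, if_pos hvr]
            exact List.mem_cons_of_mem _ he
          · rw [pvOcc_eq_nil hvr] at he; cases he
        · exact pv_mem_update_left _ (hseen v hv' e (pvOcc_mem_tail x he))

-- A's port (slices and enumerate over the full list) equals the structural recursion pvG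
theorem pvA_eq_pvG (full : List Int) :
    ∀ (t : List Int) (n : Nat) (s : List Int), full.drop n = t →
      (PySem.List.enumerate t.dropLast ((n : Nat) : Int)).foldl
        (fun matching ip =>
          (PySem.List.enumerate (PySem.List.slice full (some (ip.1 + 1)) none) (ip.1 + 1)).foldl
            (fun m jq => if ip.2 = jq.2 then PySem.Set.add (PySem.Set.add m ip.1) jq.1 else m)
            matching) s
      = pvG t s n := by
  intro t
  induction t with
  | nil => intro n s _; simp [pvG, PySem.List.enumerate_nil]
  | cons x r ih =>
    intro n s hfull
    cases r with
    | nil => simp [pvG, PySem.List.enumerate_nil]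
    | cons y r' =>
      have hdrop : full.drop (n + 1) = y :: r' := by
        have := congrArg (List.drop 1) hfull
        simpa [List.drop_drop, Nat.add_comm] using this
      have hslice : PySem.List.slice full (some (((n + 1 : Nat)) : Int)) none = y :: r' := by
        rw [PySem.List.slice_from full (by positivity)]
        simp [hdrop]
      show (PySem.List.enumerate (x :: (y :: r').dropLast) _).foldl _ _ = _
      rw [PySem.List.enumerate_cons, List.foldl_cons]
      have hcast : ((n : Int) + 1) = (((n + 1 : Nat)) : Int) := by push_cast; ring
      have hbody : pvG (x :: y :: r') s n = pvG (y :: r')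
          ((PySem.List.enumerate (y :: r') ((n : Int) + 1)).foldl
            (fun m jq => if x = jq.2 then PySem.Set.add (PySem.Set.add m (n : Int)) jq.1 else m) s)
          (n + 1) := rfl
      rw [hbody]
      rw [show ((n : Int), x).1 + 1 = (((n + 1 : Nat)) : Int) from hcast]
      rw [hslice]
      rw [ih (n + 1) _ hdrop]

theorem pvA_canon (ps : List Int) :
    get_matching_positions ps = PySem.Set.update [] (pvCseq [] 0 ps) := by
  rw [get_matching_positions, PySem.List.slice_to_neg_one]
  rw [show (0 : Int) = ((0 : Nat) : Int) from rfl]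
  rw [pvA_eq_pvG ps ps 0 PySem.Set.empty (by simp)]
  exact pvG_eq_update ps 0 _ [] (by intro v hv; cases hv)

-- B-side: index list of the grouped dict's entry at v is pvOcc 0 v ps
theorem pv_filter_enum (v : Int) :
    ∀ (t : List Int) (m : Nat),
      ((PySem.List.enumerate t ((m : Nat) : Int)).filter (fun q => q.2 == v)).map (fun q => q.1)
        = pvOcc m v t := by
  intro t
  induction t with
  | nil => intro m; simp [PySem.List.enumerate_nil, pvOcc]
  | cons y t ih =>
    intro m
    rw [PySem.List.enumerate_cons]
    have hcast : ((m : Int) + 1) = (((m + 1 : Nat)) : Int) := by push_cast; ring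
    rw [List.filter_cons]
    by_cases hyv : y = v
    · simp only [hyv, beq_self_eq_true, if_pos, List.map_cons, hcast, ih (m + 1)]
      simp [pvOcc]
    · have hb : ((((m : Nat) : Int), y).2 == v) = false := by simpa using hyv
      have hvy : ¬ v = y := fun h => hyv h.symm
      simp only [hb, Bool.false_eq_true, pvOcc, hvy, if_false, List.nil_append]
      rw [hcast, ih (m + 1)]

theorem pv_update_eq_pvD : ∀ (l s : List Int), PySem.Set.update s l = s ++ pvD s l := by
  intro l
  induction l with
  | nil => intro s; simp [PySem.Set.update, pvD]
  | cons y l ih =>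
    intro s
    show PySem.Set.update (PySem.Set.add s y) l = _
    by_cases hy : y ∈ s
    · rw [pv_add_of_mem hy, ih s]
      simp [pvD, hy]
    · have : PySem.Set.add s y = s ++ [y] := by
        simp [PySem.Set.add, PySem.Set.contains, hy]
      rw [this, ih (s ++ [y])]
      simp [pvD, hy]

theorem pvD_congr : ∀ (l s s' : List Int), (∀ a, a ∈ s ↔ a ∈ s') → pvD s l = pvD s' l := by
  intro l
  induction l with
  | nil => intro s s' _; rfl
  | cons y l ih =>
    intro s s' h
    by_cases hy : y ∈ s
    · simp only [pvD, if_pos hy, if_pos ((h y).1 hy)]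
      exact ih s s' h
    · have hy' : y ∉ s' := fun hc => hy ((h y).2 hc)
      simp only [pvD, if_neg hy, if_neg hy']
      rw [ih (s ++ [y]) (s' ++ [y]) (by intro a; simp [List.mem_append, h a])]

-- B's scan over the deduplicated values equals fold-add of the canonical sequence
theorem pvB_scan (ps : List Int) :
    ∀ (t : List Int) (k : Nat) (seen s : List Int),
      ps.drop k = t → (∀ v, v ∈ seen ↔ v ∈ ps.take k) →
      (pvD seen t).foldl
        (fun m v => if 1 < (pvOcc 0 v ps).length then PySem.Set.update m (pvOcc 0 v ps) else m) s
      = PySem.Set.update s (pvCseq seen k t) := by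
  intro t
  induction t with
  | nil => intro k seen s _ _; simp [pvD, pvCseq, PySem.Set.update]
  | cons x r ih =>
    intro k seen s hdrop hseen
    have hk : k < ps.length := by
      by_contra hc
      rw [List.drop_eq_nil_of_le (by omega)] at hdrop
      cases hdrop
    have hps : ps = ps.take k ++ (x :: r) := by rw [← hdrop, List.take_append_drop]
    have hlen : (ps.take k).length = k := by simp [List.length_take]; omega
    have hdrop' : ps.drop (k + 1) = r := by
      have := congrArg (List.drop 1) hdrop
      simpa [List.drop_drop, Nat.add_comm] using this
    have htake : ps.take (k + 1) = ps.take k ++ [x] := by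
      conv_lhs => rw [hps]
      rw [show k + 1 = (ps.take k).length + 1 by omega]
      rw [List.take_append]
      simp
    have hseen' : ∀ v, v ∈ x :: seen ↔ v ∈ ps.take (k + 1) := by
      intro v
      rw [htake]
      simp [List.mem_append, hseen v, or_comm]
    by_cases hx : x ∈ seen
    · have hD : pvD seen (x :: r) = pvD seen r := by simp [pvD, hx]
      rw [hD, pvD_congr r seen (x :: seen) (by
        intro a; simp only [List.mem_cons]
        constructor
        · exact Or.inr
        · rintro (rfl | h); exacts [hx, h])]
      rw [ih (k + 1) (x :: seen) s hdrop' hseen']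
      simp [pvCseq, hx]
    · have hxtake : x ∉ ps.take k := fun hc => hx ((hseen x).2 hc)
      have hocc : pvOcc 0 x ps = (k : Int) :: pvOcc (k + 1) x r := by
        conv_lhs => rw [hps]
        rw [pvOcc_append, pvOcc_eq_nil hxtake, hlen]
        simp [pvOcc]
      have hlencond : (1 < (pvOcc 0 x ps).length) ↔ x ∈ r := by
        rw [hocc]
        simp only [List.length_cons]
        constructor
        · intro h
          by_contra hc
          rw [pvOcc_eq_nil hc] at h
          simp at h
        · intro h
          have hne := pvOcc_ne_nil h (k + 1)
          have : 0 < (pvOcc (k + 1) x r).length := List.length_pos_of_ne_nil hne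
          omega
      have hstep : (if 1 < (pvOcc 0 x ps).length then PySem.Set.update s (pvOcc 0 x ps) else s)
          = PySem.Set.update s (if x ∈ r then (k : Int) :: pvOcc (k + 1) x r else []) := by
        by_cases hxr : x ∈ r
        · rw [if_pos (hlencond.2 hxr), if_pos hxr, hocc]
        · rw [if_neg (fun hc => hxr (hlencond.1 hc)), if_neg hxr]
          rfl
      have hD : pvD seen (x :: r) = x :: pvD (seen ++ [x]) r := by simp [pvD, hx]
      rw [hD, List.foldl_cons, hstep]
      rw [pvD_congr r (seen ++ [x]) (x :: seen) (by intro a; simp [List.mem_append]; tauto)]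
      rw [ih (k + 1) (x :: seen) _ hdrop' hseen']
      have hsplit : pvCseq seen k (x :: r)
          = (if x ∈ r then (k : Int) :: pvOcc (k + 1) x r else []) ++ pvCseq (x :: seen) (k + 1) r := by
        simp [pvCseq, hx]
      rw [hsplit, pv_update_append]

theorem pvB_canon (ps : List Int) :
    get_matching_positions_alt ps = PySem.Set.update [] (pvCseq [] 0 ps) := by
  rw [get_matching_positions_alt]
  have hkeys : ((PySem.List.enumerate ps 0).foldl
      (fun d q => d.modify q.2 [] (fun g => g ++ [q.1])) PySem.Dict.empty).keys
      = PySem.Set.ofList ps := by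
    rw [PySem.Dict.keys_foldl_modify_key (PySem.List.enumerate ps 0) (fun q => q.2) []
      (fun d q => fun g => g ++ [q.1]) PySem.Dict.empty]
    rw [PySem.List.map_snd_enumerate]
    rfl
  have hnodup : ((PySem.List.enumerate ps 0).foldl
      (fun d q => d.modify q.2 [] (fun g => g ++ [q.1])) PySem.Dict.empty).keys.Nodup := by
    apply PySem.Dict.nodup_keys_foldl_modify_key (PySem.List.enumerate ps 0) (fun q => q.2) []
      (fun d q => fun g => g ++ [q.1]) PySem.Dict.empty
    simp [PySem.Dict.empty]
  have hgetD : ∀ v, ((PySem.List.enumerate ps 0).foldl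
      (fun d q => d.modify q.2 [] (fun g => g ++ [q.1])) PySem.Dict.empty).getD v []
      = pvOcc 0 v ps := by
    intro v
    have hswap : (PySem.List.enumerate ps 0).foldl
        (fun d q => d.modify q.2 [] (fun g => g ++ [q.1])) PySem.Dict.empty
        = ((PySem.List.enumerate ps 0).map Prod.swap).foldl
            (fun d p => d.modify p.1 [] (fun g => g ++ [p.2])) PySem.Dict.empty := by
      rw [List.foldl_map]
      rfl
    rw [hswap, PySem.Dict.getD_foldl_modify_append]
    rw [List.filter_map, List.map_map]
    have h1 : ((fun p => p.1 == v) ∘ Prod.swap : Int × Int → Bool) = fun q => q.2 == v := rfl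
    rw [h1]
    have h2 : ((fun x => x.2) ∘ (Prod.swap : Int × Int → Int × Int)) = fun q => q.1 := rfl
    rw [h2]
    rw [show (0 : Int) = ((0 : Nat) : Int) from rfl, pv_filter_enum v ps 0]
    rfl
  rw [PySem.Dict.values_eq_map_keys _ hnodup []]
  rw [List.foldl_map]
  simp only [hgetD, hkeys]
  have hofList : PySem.Set.ofList ps = pvD [] ps := by
    have := pv_update_eq_pvD ps []
    simpa [PySem.Set.update, PySem.Set.ofList, PySem.Set.empty] using this
  rw [hofList]
  exact pvB_scan ps ps 0 [] PySem.Set.empty rfl (by simp)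

-- ===== VERDICT (by name: the statement is the Claim_ definition above) =====
theorem get_matching_positions_spec : Claim_equal_get_matching_positions := by
  intro ps _
  unfold Spec_get_matching_positions
  rw [pvA_canon, pvB_canon]
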